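-- pv_equiv track=rewrite | github.com/DrDonut326/AdventofCode | 2017/Day 21.py | subdivide_3_array
-- ===== SOURCE A (Python) =====
-- def subdivide_3_array(arr):
--     """Divides an array divisible by 3 into 3x3 chunks"""
--     assert len(arr) % 3 == 0
--
--     ans = []
--
--     row_length = len(arr)
--
--     y = 0
--     while y < row_length:
--
--         # Iterate along x
--         x = 0
--         chunk = []
--         while x < row_length:
--             row_1 = []
--             row_1.append(arr[y][x])
--             row_1.append(arr[y][x+1])
--             row_1.append(arr[y][x+2])
--
--             row_2 = []
--             row_2.append(arr[y+1][x])
--             row_2.append(arr[y+1][x + 1])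
--             row_2.append(arr[y+1][x + 2])
--
--             row_3 = []
--             row_3.append(arr[y + 2][x])
--             row_3.append(arr[y + 2][x + 1])
--             row_3.append(arr[y + 2][x + 2])
--
--             chunk.append(row_1)
--             chunk.append(row_2)
--             chunk.append(row_3)
--
--             ans.append(chunk)
--             chunk = []
--
--             x += 3
--
--         y += 3
--
--     return ans
-- ===== SOURCE B (Python) =====
-- def subdivide_3_array(arr):
--     """Divides an array divisible by 3 into 3x3 chunks"""
--     assert len(arr) % 3 == 0
--     n = len(arr)
--     ans = []
--     for i in range(0, n, 3):
--         r0, r1, r2 = arr[i], arr[i + 1], arr[i + 2]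
--         s0 = [[r0[j], r0[j + 1], r0[j + 2]] for j in range(0, n, 3)]
--         s1 = [[r1[j], r1[j + 1], r1[j + 2]] for j in range(0, n, 3)]
--         s2 = [[r2[j], r2[j + 1], r2[j + 2]] for j in range(0, n, 3)]
--         for a, b, c in zip(s0, s1, s2):
--             ans.append([a, b, c])
--     return ans
-- ===== Notes on version B (the rewrite author's own statement) =====
-- stated objective: alternative
-- what changed: Instead of copying each 3x3 chunk cell-by-cell with nested while loops, B splits each band of three rows into per-row lists of column triples and transposes them with zip to form the chunks.
import Mathlib
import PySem

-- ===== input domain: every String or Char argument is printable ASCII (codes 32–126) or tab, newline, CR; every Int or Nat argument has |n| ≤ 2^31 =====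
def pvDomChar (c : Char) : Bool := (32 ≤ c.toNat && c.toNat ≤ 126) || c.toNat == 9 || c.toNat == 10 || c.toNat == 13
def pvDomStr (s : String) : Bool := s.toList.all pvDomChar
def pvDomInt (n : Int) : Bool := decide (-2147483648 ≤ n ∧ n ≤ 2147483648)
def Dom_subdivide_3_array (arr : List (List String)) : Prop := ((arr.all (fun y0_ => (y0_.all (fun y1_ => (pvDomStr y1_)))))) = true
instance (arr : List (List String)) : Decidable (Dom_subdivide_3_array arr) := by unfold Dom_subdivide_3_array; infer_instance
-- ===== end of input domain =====

-- B builds each band of three rows as per-row column-triple lists and transposes them with zip,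
-- instead of A's cell-by-cell chunk copying; same cost, different decomposition.

-- ===== PORT A =====
-- arr[y][x] (indices are in range on Pre_; pyGetD is exact there)
def pvCell (arr : List (List String)) (y x : Int) : String :=
  PySem.List.pyGetD (PySem.List.pyGetD arr y []) x ""

-- the inner 'while x < row_length' loop of A (ans restarted empty; results concatenated by the caller)
def pvAInner (arr : List (List String)) (n y x : Int) : List (List (List String)) :=
  if _h : x < n then
    let row_1 := [pvCell arr y x, pvCell arr y (x+1), pvCell arr y (x+2)]
    let row_2 := [pvCell arr (y+1) x, pvCell arr (y+1) (x+1), pvCell arr (y+1) (x+2)]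
    let row_3 := [pvCell arr (y+2) x, pvCell arr (y+2) (x+1), pvCell arr (y+2) (x+2)]
    [row_1, row_2, row_3] :: pvAInner arr n y (x+3)
  else []
termination_by (n - x).toNat
decreasing_by omega

-- the outer 'while y < row_length' loop of A
def pvAOuter (arr : List (List String)) (n y : Int) : List (List (List String)) :=
  if _h : y < n then pvAInner arr n y 0 ++ pvAOuter arr n (y+3)
  else []
termination_by (n - y).toNat
decreasing_by omega

def subdivide_3_array (arr : List (List String)) : List (List (List String)) :=
  pvAOuter arr (arr.length : Int) 0

-- ===== PORT B =====
-- [[r[j], r[j+1], r[j+2]] for j in range(0, n, 3)]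
def pvColSplit (n : Int) (r : List String) : List (List String) :=
  (PySem.List.pyRange 0 n 3).map
    (fun j => [PySem.List.pyGetD r j "", PySem.List.pyGetD r (j+1) "", PySem.List.pyGetD r (j+2) ""])

def subdivide_3_array_alt (arr : List (List String)) : List (List (List String)) :=
  let n : Int := arr.length
  (PySem.List.pyRange 0 n 3).foldl
    (fun ans i =>
      let r0 := PySem.List.pyGetD arr i []
      let r1 := PySem.List.pyGetD arr (i+1) []
      let r2 := PySem.List.pyGetD arr (i+2) []
      ans ++ List.zipWith3 (fun a b c => [a, b, c])
        (pvColSplit n r0) (pvColSplit n r1) (pvColSplit n r2))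
    []

-- ===== PRECONDITION & SPEC =====
-- Pre_ excludes exactly the inputs where A raises: the assert (len(arr) % 3 != 0 → AssertionError)
-- and rows shorter than len(arr) (→ IndexError on arr[y][x+2]).
def Pre_subdivide_3_array (arr : List (List String)) : Prop :=
  arr.length % 3 = 0 ∧ ∀ r ∈ arr, arr.length ≤ r.length

instance (arr : List (List String)) : Decidable (Pre_subdivide_3_array arr) := by
  unfold Pre_subdivide_3_array; infer_instance

def pvWitness_subdivide_3_array : List (List String) :=
  [["a", "b", "c"], ["d", "e", "f"], ["g", "h", "i"]]

def Spec_subdivide_3_array (arr : List (List String)) (out : List (List (List String))) : Prop := out = subdivide_3_array_alt arr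
instance (arr : List (List String)) (out : List (List (List String))) : Decidable (Spec_subdivide_3_array arr out) := by unfold Spec_subdivide_3_array; infer_instance

-- ===== CLAIM (what is proved, stated in full; the proofs are below) =====
def Claim_equal_subdivide_3_array : Prop := ∀ (arr : List (List String)), Dom_subdivide_3_array arr → Pre_subdivide_3_array arr → Spec_subdivide_3_array arr (subdivide_3_array arr)

-- ===== LEMMAS AND PROOFS =====

-- range(a, b, 3) unfolds one step
lemma pyRange3_cons (a b : Int) (h : a < b) :
    PySem.List.pyRange a b 3 = a :: PySem.List.pyRange (a+3) b 3 := by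
  rw [PySem.List.pyRange_of_pos a b (by omega), PySem.List.pyRange_of_pos (a+3) b (by omega)]
  have hc : (if a < b then ((b - a + 3 - 1) / 3).toNat else 0)
      = (if a + 3 < b then ((b - (a+3) + 3 - 1) / 3).toNat else 0) + 1 := by
    split_ifs <;> omega
  rw [hc, List.range_succ_eq_map, List.map_cons, List.map_map]
  congr 1
  · omega
  · apply List.map_congr_left; intro k _; simp; omega

lemma pyRange3_nil (a b : Int) (h : b ≤ a) : PySem.List.pyRange a b 3 = [] := by
  rw [PySem.List.pyRange_of_pos a b (by omega)]
  simp [show ¬ a < b by omega]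

lemma zipWith3_map_map_map {α β : Type} (f : β → β → β → α) (g h k : Int → β) (l : List Int) :
    List.zipWith3 f (l.map g) (l.map h) (l.map k) = l.map (fun j => f (g j) (h j) (k j)) := by
  induction l with
  | nil => rfl
  | cons x xs ih => simp [List.zipWith3, ih]

lemma pvAInner_eq (arr : List (List String)) (n y x : Int) :
    pvAInner arr n y x = (PySem.List.pyRange x n 3).map (fun j =>
      [[pvCell arr y j, pvCell arr y (j+1), pvCell arr y (j+2)],
       [pvCell arr (y+1) j, pvCell arr (y+1) (j+1), pvCell arr (y+1) (j+2)],
       [pvCell arr (y+2) j, pvCell arr (y+2) (j+1), pvCell arr (y+2) (j+2)]]) := by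
  rw [pvAInner]
  split_ifs with h
  · rw [pyRange3_cons x n h, List.map_cons, pvAInner_eq]
  · rw [pyRange3_nil x n (by omega)]; rfl
termination_by (n - x).toNat
decreasing_by omega

lemma pvAOuter_eq (arr : List (List String)) (n y : Int) :
    pvAOuter arr n y = (PySem.List.pyRange y n 3).flatMap (fun i => pvAInner arr n i 0) := by
  rw [pvAOuter]
  split_ifs with h
  · rw [pyRange3_cons y n h, List.flatMap_cons, pvAOuter_eq]
  · rw [pyRange3_nil y n (by omega)]; rfl
termination_by (n - y).toNat
decreasing_by omega

-- one band of B equals one inner loop of A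
lemma band_eq (arr : List (List String)) (n i : Int) :
    List.zipWith3 (fun a b c => [a, b, c])
      (pvColSplit n (PySem.List.pyGetD arr i []))
      (pvColSplit n (PySem.List.pyGetD arr (i+1) []))
      (pvColSplit n (PySem.List.pyGetD arr (i+2) [])) = pvAInner arr n i 0 := by
  rw [pvAInner_eq]
  unfold pvColSplit
  rw [zipWith3_map_map_map]
  rfl

-- ===== VERDICT (by name: the statement is the Claim_ definition above) =====
theorem subdivide_3_array_spec : Claim_equal_subdivide_3_array := by
  intro arr _ _
  unfold Spec_subdivide_3_array subdivide_3_array subdivide_3_array_alt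
  rw [pvAOuter_eq]
  rw [PySem.List.foldl_append_eq_flatMap
    (fun i => List.zipWith3 (fun a b c => [a, b, c])
      (pvColSplit (arr.length : Int) (PySem.List.pyGetD arr i []))
      (pvColSplit (arr.length : Int) (PySem.List.pyGetD arr (i+1) []))
      (pvColSplit (arr.length : Int) (PySem.List.pyGetD arr (i+2) []))) _ []]
  simp only [List.nil_append]
  refine List.flatMap_congr (fun i _ => ?_)
  exact (band_eq arr (arr.length : Int) i).symm
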